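-- pv_equiv track=rewrite | github.com/marlonluo2018/outlook-mcp-server | backend/email_retrieval.py | _are_terms_close
-- ===== SOURCE A (Python) =====
-- from typing import List, Dict, Optional
--
-- def _are_terms_close(text: str, terms: List[str], max_distance: int = 50) -> bool:
--     """
--     Check if all terms appear close to each other in the text.
--
--     Args:
--         text: The text to search in
--         terms: List of terms to search for
--         max_distance: Maximum distance between terms (in characters)
--
--     Returns:
--         True if all terms appear close to each other, False otherwise
--     """
--     if len(terms) <= 1:
--         return True
--
--     # Find all positions of each term in the text
--     term_positions = {}
--     for term in terms:
--         positions = []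
--         start = 0
--         while True:
--             pos = text.find(term, start)
--             if pos == -1:
--                 break
--             positions.append(pos)
--             start = pos + 1
--         term_positions[term] = positions
--
--     # Check if there's a combination of positions where all terms are close
--     # We'll use a simple approach: check if any term's position is close to any other term's position
--     for i, term1 in enumerate(terms):
--         for term2 in terms[i+1:]:
--             positions1 = term_positions.get(term1, [])
--             positions2 = term_positions.get(term2, [])
--
--             # Check if any position of term1 is close to any position of term2
--             found_close = False
--             for pos1 in positions1:
--                 for pos2 in positions2:
--                     if abs(pos1 - pos2) <= max_distance:
--                         found_close = True
--                         break
--                 if found_close: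
--                     break
--
--             if not found_close:
--                 return False
--
--     return True
-- ===== SOURCE B (Python) =====
-- from typing import List
--
-- def _are_terms_close(text: str, terms: List[str], max_distance: int = 50) -> bool:
--     if len(terms) <= 1:
--         return True
--
--     # All match positions of t in ascending order (overlaps included).
--     def positions(t):
--         out = []
--         p = text.find(t)
--         while p != -1:
--             out.append(p)
--             p = text.find(t, p + 1)
--         return out
--
--     # Two-pointer sweep: is any gap between the two ascending lists <= max_distance?
--     def close(xs, ys):
--         i = j = 0
--         while i < len(xs) and j < len(ys):
--             if abs(xs[i] - ys[j]) <= max_distance: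
--                 return True
--             if xs[i] < ys[j]:
--                 i += 1
--             else:
--                 j += 1
--         return False
--
--     plists = [positions(t) for t in terms]
--     for i in range(len(plists)):
--         for j in range(i + 1, len(plists)):
--             if not close(plists[i], plists[j]):
--                 return False
--     return True
-- ===== Notes on version B (the rewrite author's own statement) =====
-- stated objective: alternative
-- what changed: Per pair of terms, A scans every pair of positions of the two terms (quadratic in the occurrence counts); B runs a single two-pointer sweep over the two ascending position lists (linear in the occurrence counts), keeping the positions in a per-term list instead of A's dict.
import Mathlib
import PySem

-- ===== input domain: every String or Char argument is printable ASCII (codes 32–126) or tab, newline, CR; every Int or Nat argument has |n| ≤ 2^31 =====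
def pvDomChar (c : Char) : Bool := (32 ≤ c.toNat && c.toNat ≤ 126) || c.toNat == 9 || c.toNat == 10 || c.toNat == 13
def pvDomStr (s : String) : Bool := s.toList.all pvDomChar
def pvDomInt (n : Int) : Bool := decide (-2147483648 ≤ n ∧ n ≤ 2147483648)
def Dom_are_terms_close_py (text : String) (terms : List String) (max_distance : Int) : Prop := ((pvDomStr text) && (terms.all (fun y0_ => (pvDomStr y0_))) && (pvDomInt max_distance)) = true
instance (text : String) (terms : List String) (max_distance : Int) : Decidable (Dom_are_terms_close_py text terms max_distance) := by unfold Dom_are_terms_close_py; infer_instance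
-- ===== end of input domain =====

-- B replaces A's nested scan over every pair of positions by a two-pointer sweep over the
-- (already ascending) position lists of each term pair: an alternative algorithm, same values.

-- ===== PORT A =====
-- A's find loop stops when text.find(term, start) = -1; CPython returns -1 once start > len.
theorem pvFindFrom_gt_len (s sub : List Char) (k : Nat) (h : s.length < k) :
    PySem.Chars.findFrom s sub (k : Int) none = -1 := by
  simp only [PySem.Chars.findFrom]
  have h1 : ¬ ((k : Int) < 0) := by omega
  rw [if_neg h1, if_pos (by exact_mod_cast h)]

-- `while True: pos = text.find(term, start); if pos == -1: break; positions.append(pos); start = pos + 1`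
def pyFindPositions (s sub : List Char) (start : Nat) : List Int :=
  let p := PySem.Chars.findFrom s sub (start : Int) none
  if h : p = -1 then []
  else p :: pyFindPositions s sub (p.toNat + 1)
termination_by s.length + 1 - start
decreasing_by
  by_cases hle : start ≤ s.length
  · have hs := PySem.Chars.findFrom_natCast_spec s sub start hle h
    omega
  · exact absurd (pvFindFrom_gt_len s sub start (by omega)) h

-- inner `for pos2 in positions2: if abs(pos1 - pos2) <= max_distance: found_close = True; break`
def anyCloseInner (p1 : Int) (ys : List Int) (d : Int) : Bool :=
  match ys with
  | [] => false
  | y :: ys' => if |p1 - y| ≤ d then true else anyCloseInner p1 ys' d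

-- outer `for pos1 in positions1: …; if found_close: break`
def anyCloseA (xs ys : List Int) (d : Int) : Bool :=
  match xs with
  | [] => false
  | x :: xs' => if anyCloseInner x ys d then true else anyCloseA xs' ys d

-- `for i, term1 in enumerate(terms): for term2 in terms[i+1:]: … ; if not found_close: return False`
def pairLoopA (tp : PySem.Dict String (List Int)) (d : Int) : List String → Bool
  | [] => true
  | t1 :: rest =>
    if rest.all (fun t2 => anyCloseA (tp.getD t1 []) (tp.getD t2 []) d) then pairLoopA tp d rest
    else false

def are_terms_close_py (text : String) (terms : List String) (max_distance : Int) : Bool :=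
  if terms.length ≤ 1 then true
  else
    let tp := terms.foldl
      (fun d t => d.insert t (pyFindPositions text.toList t.toList 0)) PySem.Dict.empty
    pairLoopA tp max_distance terms

-- ===== PORT B =====
-- Source B's `positions` is the same find loop as A's (`p = text.find(t, p + 1)` until -1),
-- so its port reuses pyFindPositions above.
-- the two-pointer while loop of `close` (the index pair i,j → structural recursion on the lists)
def twoPtr (d : Int) : List Int → List Int → Bool
  | [], _ => false
  | _ :: _, [] => false
  | x :: xs, y :: ys =>
    if |x - y| ≤ d then true
    else if x < y then twoPtr d xs (y :: ys)
    else twoPtr d (x :: xs) ys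

-- `for i …: for j in range(i+1, …): if not close(plists[i], plists[j]): return False`
def pairLoopB (d : Int) : List (List Int) → Bool
  | [] => true
  | xs :: rest => rest.all (fun ys => twoPtr d xs ys) && pairLoopB d rest

def are_terms_close_py_alt (text : String) (terms : List String) (max_distance : Int) : Bool :=
  if terms.length ≤ 1 then true
  else pairLoopB max_distance (terms.map (fun t => pyFindPositions text.toList t.toList 0))

-- ===== PRECONDITION & SPEC =====
def Spec_are_terms_close_py (text : String) (terms : List String) (max_distance : Int) (out : Bool) : Prop := out = are_terms_close_py_alt text terms max_distance
instance (text : String) (terms : List String) (max_distance : Int) (out : Bool) : Decidable (Spec_are_terms_close_py text terms max_distance out) := by unfold Spec_are_terms_close_py; infer_instance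

-- ===== CLAIM (what is proved, stated in full; the proofs are below) =====
def Claim_equal_are_terms_close_py : Prop := ∀ (text : String) (terms : List String) (max_distance : Int), Dom_are_terms_close_py text terms max_distance → Spec_are_terms_close_py text terms max_distance (are_terms_close_py text terms max_distance)

-- ===== LEMMAS AND PROOFS =====

-- every collected position is ≥ the current start of the find loop
theorem pyFindPositions_lb (s sub : List Char) (start : Nat) :
    ∀ p ∈ pyFindPositions s sub start, (start : Int) ≤ p := by
  induction start using pyFindPositions.induct s sub with
  | case1 start p0 hm =>
    have hm' : PySem.Chars.findFrom s sub (start : Int) none = -1 := hm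
    rw [pyFindPositions]
    simp [dif_pos hm']
  | case2 start p0 hm ih =>
    have hm' : ¬ PySem.Chars.findFrom s sub (start : Int) none = -1 := hm
    have hle : start ≤ s.length := by
      by_contra hgt
      exact hm' (pvFindFrom_gt_len s sub start (by omega))
    obtain ⟨hge, -, -⟩ := PySem.Chars.findFrom_natCast_spec s sub start hle hm'
    rw [pyFindPositions]
    simp only [dif_neg hm', List.mem_cons]
    rintro p (rfl | hp)
    · exact hge
    · have := ih p hp
      omega

-- the find loop emits positions in ascending order
theorem pyFindPositions_sorted (s sub : List Char) (start : Nat) :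
    (pyFindPositions s sub start).Pairwise (· ≤ ·) := by
  induction start using pyFindPositions.induct s sub with
  | case1 start p0 hm =>
    have hm' : PySem.Chars.findFrom s sub (start : Int) none = -1 := hm
    rw [pyFindPositions]
    simp [dif_pos hm']
  | case2 start p0 hm ih =>
    have hm' : ¬ PySem.Chars.findFrom s sub (start : Int) none = -1 := hm
    rw [pyFindPositions]
    simp only [dif_neg hm']
    refine List.pairwise_cons.mpr ⟨fun p hp => ?_, ih⟩
    have h1 := pyFindPositions_lb s sub
      ((PySem.Chars.findFrom s sub (start : Int) none).toNat + 1) p hp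
    omega

theorem anyCloseInner_iff (p1 : Int) (ys : List Int) (d : Int) :
    anyCloseInner p1 ys d = true ↔ ∃ y ∈ ys, |p1 - y| ≤ d := by
  induction ys with
  | nil => simp [anyCloseInner]
  | cons y ys ih =>
    simp only [anyCloseInner, List.mem_cons]
    split_ifs with h
    · simp only [true_iff]
      exact ⟨y, Or.inl rfl, h⟩
    · rw [ih]
      constructor
      · rintro ⟨q, hq, hd⟩; exact ⟨q, Or.inr hq, hd⟩
      · rintro ⟨q, (rfl | hq), hd⟩
        · exact absurd hd h
        · exact ⟨q, hq, hd⟩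

theorem anyCloseA_iff (xs ys : List Int) (d : Int) :
    anyCloseA xs ys d = true ↔ ∃ x ∈ xs, ∃ y ∈ ys, |x - y| ≤ d := by
  induction xs with
  | nil => simp [anyCloseA]
  | cons x xs ih =>
    simp only [anyCloseA, List.mem_cons]
    split_ifs with h
    · simp only [true_iff]
      obtain ⟨y, hy, hd⟩ := (anyCloseInner_iff x ys d).mp h
      exact ⟨x, Or.inl rfl, y, hy, hd⟩
    · rw [ih]
      constructor
      · rintro ⟨q, hq, hy⟩; exact ⟨q, Or.inr hq, hy⟩
      · rintro ⟨q, (rfl | hq), hy⟩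
        · exact absurd ((anyCloseInner_iff q ys d).mpr hy) h
        · exact ⟨q, hq, hy⟩

-- correctness of the two-pointer sweep on ascending lists
theorem twoPtr_iff (d : Int) (xs ys : List Int)
    (hxs : xs.Pairwise (· ≤ ·)) (hys : ys.Pairwise (· ≤ ·)) :
    twoPtr d xs ys = true ↔ ∃ x ∈ xs, ∃ y ∈ ys, |x - y| ≤ d := by
  induction xs, ys using twoPtr.induct d with
  | case1 ys => simp [twoPtr]
  | case2 x xs => simp [twoPtr]
  | case3 x xs y ys h =>
    rw [twoPtr]
    simp only [if_pos h, true_iff]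
    exact ⟨x, List.mem_cons_self, y, List.mem_cons_self, h⟩
  | case4 x xs y ys hfar hlt ih =>
    rw [twoPtr, if_neg hfar, if_pos hlt,
      ih (hxs.sublist (List.sublist_cons_self x xs)) hys]
    constructor
    · rintro ⟨q, hq, r, hr, hd⟩
      exact ⟨q, List.mem_cons_of_mem x hq, r, hr, hd⟩
    · rintro ⟨q, hq0, r, hr, hd⟩
      rcases List.mem_cons.mp hq0 with rfl | hq
      · -- q = x is never within d of any r ∈ y :: ys (all are ≥ y > x + d)
        exfalso
        have hyr : y ≤ r := by
          rcases List.mem_cons.mp hr with rfl | hr'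
          · exact le_refl r
          · exact (List.pairwise_cons.mp hys).1 r hr'
        rw [abs_le] at hd hfar
        omega
      · exact ⟨q, hq, r, hr, hd⟩
  | case5 x xs y ys hfar hge ih =>
    rw [twoPtr, if_neg hfar, if_neg hge,
      ih hxs (hys.sublist (List.sublist_cons_self y ys))]
    constructor
    · rintro ⟨q, hq, r, hr, hd⟩
      exact ⟨q, hq, r, List.mem_cons_of_mem y hr, hd⟩
    · rintro ⟨q, hq, r, hr0, hd⟩
      rcases List.mem_cons.mp hr0 with rfl | hr
      · exfalso
        have hxq : x ≤ q := by
          rcases List.mem_cons.mp hq with rfl | hq'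
          · exact le_refl q
          · exact (List.pairwise_cons.mp hxs).1 q hq'
        rw [abs_le] at hd hfar
        omega
      · exact ⟨q, hq, r, hr, hd⟩

-- A's dict of positions, looked up after the build: value of the last (= any) insert for the key
theorem getD_foldl_insert (F : String → List Int) (ts : List String)
    (d0 : PySem.Dict String (List Int)) (k : String) :
    (ts.foldl (fun d t => d.insert t (F t)) d0).getD k [] =
      if k ∈ ts then F k else d0.getD k [] := by
  induction ts generalizing d0 with
  | nil => simp
  | cons t ts ih =>
    simp only [List.foldl_cons, ih, List.mem_cons]
    by_cases hts : k ∈ ts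
    · simp [hts]
    · by_cases hkt : k = t
      · simp [hkt]
      · simp [hts, hkt, PySem.Dict.getD_insert]

theorem pvAll_congr {α : Type} (l : List α) (p q : α → Bool)
    (h : ∀ x ∈ l, p x = q x) : l.all p = l.all q := by
  induction l with
  | nil => rfl
  | cons a l ih => simp_all [List.all_cons]

-- per term pair, A's nested scan and B's two-pointer sweep agree on the (ascending) lists
theorem pairTest_eq (s : List Char) (d : Int) (t1 t2 : String) :
    anyCloseA (pyFindPositions s t1.toList 0) (pyFindPositions s t2.toList 0) d =
      twoPtr d (pyFindPositions s t1.toList 0) (pyFindPositions s t2.toList 0) := by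
  refine Bool.coe_iff_coe.mp ?_
  rw [anyCloseA_iff, twoPtr_iff d _ _ (pyFindPositions_sorted s t1.toList 0)
    (pyFindPositions_sorted s t2.toList 0)]

theorem pairLoops_eq (s : List Char) (tp : PySem.Dict String (List Int)) (d : Int)
    (ts : List String)
    (h : ∀ t ∈ ts, tp.getD t [] = pyFindPositions s t.toList 0) :
    pairLoopA tp d ts = pairLoopB d (ts.map (fun t => pyFindPositions s t.toList 0)) := by
  induction ts with
  | nil => rfl
  | cons t1 rest ih =>
    rw [pairLoopA, List.map_cons, pairLoopB]
    have hall : (rest.all fun t2 => anyCloseA (tp.getD t1 []) (tp.getD t2 []) d) =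
        ((rest.map fun t => pyFindPositions s t.toList 0).all
          fun ys => twoPtr d (pyFindPositions s t1.toList 0) ys) := by
      rw [List.all_map]
      refine pvAll_congr rest _ _ (fun t2 ht2 => ?_)
      rw [h t1 List.mem_cons_self, h t2 (List.mem_cons_of_mem t1 ht2)]
      exact pairTest_eq s d t1 t2
    rw [hall, ih (fun t ht => h t (List.mem_cons_of_mem t1 ht))]
    cases (rest.map fun t => pyFindPositions s t.toList 0).all
        fun ys => twoPtr d (pyFindPositions s t1.toList 0) ys <;> simp

-- ===== VERDICT (by name: the statement is the Claim_ definition above) =====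
theorem are_terms_close_py_spec : Claim_equal_are_terms_close_py := by
  intro text terms d _
  unfold Spec_are_terms_close_py are_terms_close_py are_terms_close_py_alt
  by_cases h : terms.length ≤ 1
  · simp [h]
  · simp only [if_neg h]
    refine pairLoops_eq text.toList _ d terms (fun t ht => ?_)
    rw [getD_foldl_insert (fun t => pyFindPositions text.toList t.toList 0) terms PySem.Dict.empty t,
      if_pos ht]
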